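-- pv_equiv track=rewrite | github.com/pypi-data/pypi-mirror-395 | packages/aurora-glm/aurora_glm-0.6.1-py3-none-any.whl/aurora/models/gam/formula.py | _parse_random_effects_formula
-- ===== SOURCE A (Python) =====
-- def _parse_random_effects_formula(formula_str: str) -> tuple[bool, tuple]:
--     """Parse the left side of a random effect term (before |).
--
--     Parameters
--     ----------
--     formula_str : str
--         Effects formula like "1", "x", "1 + x", "x + y"
--
--     Returns
--     -------
--     include_intercept : bool
--         Whether to include random intercept
--     variables : tuple
--         Variables with random slopes
--
--     Examples
--     --------
--     >>> _parse_random_effects_formula("1")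
--     (True, ())
--     >>> _parse_random_effects_formula("x")
--     (False, ('x',))
--     >>> _parse_random_effects_formula("1 + x")
--     (True, ('x',))
--     >>> _parse_random_effects_formula("x + y")
--     (False, ('x', 'y'))
--     """
--     # Split by '+'
--     parts = [p.strip() for p in formula_str.split('+')]
--
--     include_intercept = False
--     variables = []
--
--     for part in parts:
--         if not part:
--             continue
--
--         if part == '1':
--             include_intercept = True
--         elif part == '0':
--             # Explicit removal of intercept (not common but valid)
--             include_intercept = False
--         else:
--             # Variable name or index
--             try:
--                 var = int(part)
--             except ValueError:
--                 var = part
--             variables.append(var)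
--
--     return include_intercept, tuple(variables)
-- ===== SOURCE B (Python) =====
-- def _parse_random_effects_formula(formula_str: str) -> tuple[bool, tuple]:
--     """Parse the left side of a random effect term (before |).
--
--     Right-fold formulation: recurse over the '+'-parts from the right; the
--     intercept is the FIRST '0'/'1' token met in that reversed order (i.e. the
--     rightmost one), carried as an Optional, and variables are prepended, so no
--     mutable state or overwriting is needed.
--     """
--     def go(parts):
--         if not parts:
--             return None, []
--         flag, vars_ = go(parts[1:])
--         t = parts[0].strip()
--         if not t:
--             return flag, vars_
--         if t in ('0', '1'):
--             return (flag if flag is not None else t == '1'), vars_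
--         try:
--             v = int(t)
--         except ValueError:
--             v = t
--         return flag, [v] + vars_
--
--     flag, vars_ = go(formula_str.split('+'))
--     return flag is True, tuple(vars_)
-- ===== Notes on version B (the rewrite author's own statement) =====
-- stated objective: alternative
-- what changed: Replaces A's imperative left-to-right loop with mutable state (a Bool flag overwritten last-wins and a list appended to) by a structural right-fold: recursion over the parts from the right carrying an Optional intercept where the FIRST intercept token met (the rightmost) wins, and the variable list is built back-to-front by prepending.
-- outside the precondition, e.g. on _parse_random_effects_formula('a + 2'): A returns (False, ('a', 2)), B returns (False, ('a', 2)); on _parse_random_effects_formula(' 1_0 '): A returns (False, (10,)), B returns (False, (10,))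
import Mathlib
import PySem

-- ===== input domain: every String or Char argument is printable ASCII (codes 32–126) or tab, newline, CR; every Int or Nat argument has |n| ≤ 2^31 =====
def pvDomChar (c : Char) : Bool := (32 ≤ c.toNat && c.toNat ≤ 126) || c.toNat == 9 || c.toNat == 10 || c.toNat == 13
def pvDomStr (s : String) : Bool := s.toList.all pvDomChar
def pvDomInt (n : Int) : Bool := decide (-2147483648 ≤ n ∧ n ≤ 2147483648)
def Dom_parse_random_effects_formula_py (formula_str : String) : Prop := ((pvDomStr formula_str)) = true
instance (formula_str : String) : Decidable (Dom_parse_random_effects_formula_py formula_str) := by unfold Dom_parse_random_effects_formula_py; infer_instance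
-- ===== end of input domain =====

-- B replaces A's state-mutating left-to-right loop by a structural right-fold (Optional
-- intercept, first-from-the-right wins; variables prepended); same cost, different structure.


-- ===== PORT A =====
-- the for-loop over parts with state (include_intercept, variables)
def pvLoopA : List String → Bool → List String → Bool × List String
  | [], b, acc => (b, acc)
  | p :: rest, b, acc =>
    if p = "" then pvLoopA rest b acc
    else if p = "1" then pvLoopA rest true acc
    else if p = "0" then pvLoopA rest false acc
    else
      -- try: var = int(part) / except ValueError: var = part.  Inside Pre_ int(part) always
      -- raises ValueError, so var = part (exact on Pre_; on int-like tokens the Python value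
      -- is a Python int inside the tuple, not a value of List String — excluded by Pre_).
      pvLoopA rest b (acc ++ [p])

def parse_random_effects_formula_py (formula_str : String) : Bool × List String :=
  -- formula_str.split('+'): sep is the literal '+' ≠ '', so split? is always `some`
  let parts := ((PySem.Str.split? formula_str "+").getD []).map PySem.Str.strip
  pvLoopA parts false []

-- ===== PORT B =====
-- go(parts): recursion from the right; flag is Optional (none = no intercept token yet)
def pvGoB : List String → Option Bool × List String
  | [] => (none, [])
  | h :: rest =>
    let r := pvGoB rest
    let t := PySem.Str.strip h
    if t = "" then r
    else if t = "0" ∨ t = "1" then (some (r.1.getD (t == "1")), r.2)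
    else
      -- try int(t) / except: t — inside Pre_ int(t) always raises, so v = t (exact on Pre_)
      (r.1, t :: r.2)

def parse_random_effects_formula_py_alt (formula_str : String) : Bool × List String :=
  -- sep is the literal '+' ≠ '', so split? is always `some`
  let r := pvGoB ((PySem.Str.split? formula_str "+").getD [])
  (r.1 == some true, r.2)

-- ===== PRECONDITION & SPEC =====
-- Pre_ excludes formulas with an int-like variable token (e.g. "a + 2"): there Python A
-- returns a tuple containing a Python int, which cannot be a value of the declared Lean
-- return type (List String); B behaves identically to A there in Python.
def Pre_parse_random_effects_formula_py (formula_str : String) : Prop :=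
  ∀ t ∈ ((PySem.Str.split? formula_str "+").getD []).map PySem.Str.strip,
    t = "0" ∨ t = "1" ∨ PySem.Int.ofStr? t = none
instance (formula_str : String) : Decidable (Pre_parse_random_effects_formula_py formula_str) := by unfold Pre_parse_random_effects_formula_py; infer_instance

def pvWitness_parse_random_effects_formula_py : String := "1 + x + y"

def Spec_parse_random_effects_formula_py (formula_str : String) (out : Bool × List String) : Prop := out = parse_random_effects_formula_py_alt formula_str
instance (formula_str : String) (out : Bool × List String) : Decidable (Spec_parse_random_effects_formula_py formula_str out) := by unfold Spec_parse_random_effects_formula_py; infer_instance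

-- ===== CLAIM (what is proved, stated in full; the proofs are below) =====
def Claim_equal_parse_random_effects_formula_py : Prop := ∀ (formula_str : String), Dom_parse_random_effects_formula_py formula_str → Pre_parse_random_effects_formula_py formula_str → Spec_parse_random_effects_formula_py formula_str (parse_random_effects_formula_py formula_str)

-- ===== LEMMAS AND PROOFS =====

-- A's left-to-right loop from state (b, acc), on the stripped parts, computes exactly what
-- B's right-fold computes: the flag is B's Optional flag with default b, and the variables
-- are acc followed by B's back-to-front list.
theorem pvLoopA_eq_goB (l : List String) (b : Bool) (acc : List String) :
    pvLoopA (l.map PySem.Str.strip) b acc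
      = ((pvGoB l).1.getD b, acc ++ (pvGoB l).2) := by
  induction l generalizing b acc with
  | nil => simp [pvLoopA, pvGoB]
  | cons h rest ih =>
    simp only [List.map_cons]
    by_cases h0 : PySem.Str.strip h = ""
    · rw [show pvLoopA (PySem.Str.strip h :: rest.map PySem.Str.strip) b acc
            = pvLoopA (rest.map PySem.Str.strip) b acc from by simp [pvLoopA, h0], ih]
      simp [pvGoB, h0]
    · by_cases h1 : PySem.Str.strip h = "1"
      · rw [show pvLoopA (PySem.Str.strip h :: rest.map PySem.Str.strip) b acc
              = pvLoopA (rest.map PySem.Str.strip) true acc from by simp [pvLoopA, h1], ih]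
        cases hf : (pvGoB rest).1 <;> simp [pvGoB, h1, hf]
      · by_cases h2 : PySem.Str.strip h = "0"
        · rw [show pvLoopA (PySem.Str.strip h :: rest.map PySem.Str.strip) b acc
                = pvLoopA (rest.map PySem.Str.strip) false acc from by
              simp [pvLoopA, h2], ih]
          cases hf : (pvGoB rest).1 <;> simp [pvGoB, h2, hf]
        · rw [show pvLoopA (PySem.Str.strip h :: rest.map PySem.Str.strip) b acc
                = pvLoopA (rest.map PySem.Str.strip) b (acc ++ [PySem.Str.strip h]) from by
              simp [pvLoopA, h0, h1, h2], ih]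
          simp [pvGoB, h0, h1, h2]

-- ===== VERDICT (by name: the statement is the Claim_ definition above) =====
theorem parse_random_effects_formula_py_spec : Claim_equal_parse_random_effects_formula_py := by
  intro s _ _
  unfold Spec_parse_random_effects_formula_py
  unfold parse_random_effects_formula_py parse_random_effects_formula_py_alt
  rw [pvLoopA_eq_goB]
  cases hf : (pvGoB ((PySem.Str.split? s "+").getD [])).1 <;> simp [hf]
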